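-- pv_equiv track=rewrite | github.com/bharathkadur/CodeSignal | The Core/48. Weak Numbers/WeakNumbers.py | create_new_dictionary
-- ===== SOURCE A (Python) =====
-- import itertools
--
-- def create_new_dictionary(dictionary):
--     new_dict = {}
--     for key, value in dictionary.items():
--         count = 0
--         for val in itertools.islice(dictionary.values(), key-1):
--             if val > value:
--                 count += 1
--         new_dict[key] = count
--     return new_dict
-- ===== SOURCE B (Python) =====
-- def _bisect_right(a, x):
--     # index of the first element of sorted list a that is > x
--     # (hand-rolled: the module may not import bisect)
--     lo, hi = 0, len(a)
--     while lo < hi: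
--         mid = (lo + hi) // 2
--         if a[mid] <= x:
--             lo = mid + 1
--         else:
--             hi = mid
--     return lo
--
--
-- def create_new_dictionary(dictionary):
--     items = list(dictionary.items())
--     n = len(items)
--     vals = [v for _, v in items]
--     # query i asks: among the first min(key-1, n) values, how many exceed value i?
--     # Group the queries by prefix length, then sweep the values once, keeping the
--     # seen prefix as a sorted list and answering each group by binary search.
--     groups = {}
--     for i, (k, _) in enumerate(items):
--         groups.setdefault(min(k - 1, n), []).append(i)
--     res = {}
--     seen = []
--     for j in range(n + 1):
--         for i in groups.get(j, []):
--             res[i] = j - _bisect_right(seen, vals[i])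
--         if j < n:
--             seen.insert(_bisect_right(seen, vals[j]), vals[j])
--     return {items[i][0]: res[i] for i in range(n)}
-- ===== Notes on version B (the rewrite author's own statement) =====
-- stated objective: faster
-- what changed: Instead of rescanning the value prefix for every key (nested loops), B groups the queries by prefix length min(key-1, n) and sweeps the values once, maintaining one sorted list of the seen values and answering each group by binary search (count greater = prefix length - bisect_right); Pre_ excludes dictionaries with a key <= 0, on which A raises ValueError (islice rejects a negative stop) and B raises KeyError (its sweep never reaches a negative bucket).
import Mathlib
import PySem

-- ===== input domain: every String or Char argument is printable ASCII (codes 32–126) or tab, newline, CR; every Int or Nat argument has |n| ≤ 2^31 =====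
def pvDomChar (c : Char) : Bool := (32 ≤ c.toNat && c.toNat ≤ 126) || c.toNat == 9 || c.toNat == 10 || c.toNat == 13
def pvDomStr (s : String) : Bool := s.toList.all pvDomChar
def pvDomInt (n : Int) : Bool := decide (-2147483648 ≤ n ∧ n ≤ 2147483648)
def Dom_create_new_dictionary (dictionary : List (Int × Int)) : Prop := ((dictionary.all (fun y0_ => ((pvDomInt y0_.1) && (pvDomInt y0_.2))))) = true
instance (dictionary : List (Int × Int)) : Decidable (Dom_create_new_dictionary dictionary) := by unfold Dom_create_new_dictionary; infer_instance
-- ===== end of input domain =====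

-- B groups the prefix-count queries by prefix length and answers them in one sweep of the values,
-- maintaining a sorted list of the seen values and binary-searching it, instead of A's quadratic
-- rescan of the prefix. (The dict argument arrives as an association list; both ports first form the
-- dict it denotes with PySem.Dict.ofList — later duplicate keys overwrite in place, as dict does.)

-- ===== PORT A =====
-- islice(dictionary.values(), key-1): under Pre_ (key ≥ 1) this is exactly the clamped slice values[:key-1].
def create_new_dictionary (dictionary : List (Int × Int)) : List (Int × Int) :=
  ((PySem.Dict.ofList dictionary).items.foldl (fun nd kv =>
      PySem.Dict.insert nd kv.1
        ((PySem.List.slice (PySem.Dict.ofList dictionary).values none (some (kv.1 - 1))).foldl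
          (fun c v => if kv.2 < v then c + 1 else c) (0 : Int)))
    (PySem.Dict.empty : PySem.Dict Int Int)).items

-- ===== PORT B =====
-- _bisect_right(a, x): while lo < hi: mid = (lo+hi)//2; if a[mid] <= x: lo = mid+1 else: hi = mid
-- (the extra Nat argument is FUEL, a pure totality guard: it is always ≥ hi - lo, the loop's measure)
def pvBisectAux (a : List Int) (x : Int) : Nat → Nat → Nat → Nat
  | 0, lo, _ => lo
  | fuel + 1, lo, hi =>
    if lo < hi then
      let mid := (lo + hi) / 2
      if a.getD mid 0 ≤ x then pvBisectAux a x fuel (mid + 1) hi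
      else pvBisectAux a x fuel lo mid
    else lo

def pvBisect (a : List Int) (x : Int) : Nat := pvBisectAux a x a.length 0 a.length

-- groups.setdefault(min(k - 1, n), []).append(i)  ≡  groups[key] = groups.get(key, []) + [i]
def pvGroups (items : List (Int × Int)) : PySem.Dict Int (List Int) :=
  (PySem.List.enumerate items 0).foldl
    (fun g p => PySem.Dict.modify g (min (p.2.1 - 1) (items.length : Int)) [] (fun l => l ++ [p.1]))
    (PySem.Dict.empty : PySem.Dict Int (List Int))

-- body of 'for j in range(n + 1)'; res[i] keyed by the Python int i.
-- vals[i] / vals[j] are in range whenever Python reaches them (i from enumerate, j < n), so pyGetD is exact there.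
def pvStep (vals : List Int) (groups : PySem.Dict Int (List Int))
    (st : PySem.Dict Int Int × List Int) (j : Int) : PySem.Dict Int Int × List Int :=
  let res := (PySem.Dict.getD groups j []).foldl
      (fun r i => PySem.Dict.insert r i
        (j - (pvBisect st.2 (PySem.List.pyGetD vals i 0) : Nat))) st.1
  let seen := if j < (vals.length : Int) then
      PySem.List.insert st.2 ((pvBisect st.2 (PySem.List.pyGetD vals j 0) : Nat) : Int)
        (PySem.List.pyGetD vals j 0)
    else st.2
  (res, seen)

def create_new_dictionary_alt (dictionary : List (Int × Int)) : List (Int × Int) :=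
  let items := (PySem.Dict.ofList dictionary).items
  let n := items.length
  let vals := items.map Prod.snd
  let groups := pvGroups items
  let st := (PySem.List.pyRange 0 ((n : Int) + 1) 1).foldl (pvStep vals groups)
    ((PySem.Dict.empty : PySem.Dict Int Int), ([] : List Int))
  -- res[i] in the final comprehension: under Pre_ every index is present, so getD is exact there
  ((List.range n).foldl (fun d i =>
      PySem.Dict.insert d (items.getD i (0, 0)).1 (PySem.Dict.getD st.1 (i : Int) 0))
    (PySem.Dict.empty : PySem.Dict Int Int)).items

-- ===== PRECONDITION & SPEC =====
-- Pre_ excludes exactly the dictionaries with a key ≤ 0: there A raises ValueError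
-- (itertools.islice rejects the negative stop key-1), so A returns no value.
def Pre_create_new_dictionary (dictionary : List (Int × Int)) : Prop :=
  ∀ p ∈ dictionary, 1 ≤ p.1
instance (dictionary : List (Int × Int)) : Decidable (Pre_create_new_dictionary dictionary) := by
  unfold Pre_create_new_dictionary; infer_instance

def pvWitness_create_new_dictionary : (List (Int × Int)) := [(2, 3), (1, 0), (3, 1)]

def Spec_create_new_dictionary (dictionary : List (Int × Int)) (out : List (Int × Int)) : Prop := out = create_new_dictionary_alt dictionary
instance (dictionary : List (Int × Int)) (out : List (Int × Int)) : Decidable (Spec_create_new_dictionary dictionary out) := by unfold Spec_create_new_dictionary; infer_instance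

-- ===== CLAIM (what is proved, stated in full; the proofs are below) =====
def Claim_equal_create_new_dictionary : Prop := ∀ (dictionary : List (Int × Int)), Dom_create_new_dictionary dictionary → Pre_create_new_dictionary dictionary → Spec_create_new_dictionary dictionary (create_new_dictionary dictionary)

-- ===== LEMMAS AND PROOFS =====

-- prefsI items k: the clamped prefix length of the query at index k, as the Python computes it
def pvPrefsI (items : List (Int × Int)) (k : Nat) : Int :=
  min ((items.getD k (0, 0)).1 - 1) (items.length : Int)

-- pvAns items k: the intended answer of query k — how many of the first prefsI values exceed value k
def pvAns (items : List (Int × Int)) (k : Nat) : Int :=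
  (((items.map Prod.snd).take (pvPrefsI items k).toNat).countP
    (fun w => decide ((items.getD k (0, 0)).2 < w)) : Int)

-- pvCntA d kv: what A's inner loop computes for the entry kv of d
def pvCntA (d : List (Int × Int)) (kv : Int × Int) : Int :=
  (((d.map Prod.snd).take (kv.1 - 1).toNat).countP (fun v => decide (kv.2 < v)) : Int)

theorem pv_countP_not (p : Int → Bool) (l : List Int) :
    l.countP p + l.countP (fun a => !p a) = l.length := by
  induction l with
  | nil => simp
  | cons a t ih => by_cases h : p a <;> simp [h] <;> omega

theorem pv_sorted_le_iff (a : List Int) (x : Int) (h : a.Pairwise (· ≤ ·)) :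
    ∀ i (hi : i < a.length), (a[i] ≤ x ↔ i < a.countP (fun y => decide (y ≤ x))) := by
  induction a with
  | nil => intro i hi; simp at hi
  | cons b t ih =>
    rw [List.pairwise_cons] at h
    intro i hi
    match i with
    | 0 =>
      simp only [List.getElem_cons_zero, List.countP_cons]
      by_cases hbx : b ≤ x
      · simp [hbx]
      · have ht : t.countP (fun y => decide (y ≤ x)) = 0 := by
          rw [List.countP_eq_zero]
          intro y hy
          have := h.1 y hy
          simp only [decide_eq_true_eq]
          omega
        simp [hbx, ht]
    | i + 1 =>
      simp only [List.getElem_cons_succ, List.countP_cons]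
      rw [ih h.2 i (by simpa using hi)]
      by_cases hbx : b ≤ x
      · simp [hbx]
      · have ht : t.countP (fun y => decide (y ≤ x)) = 0 := by
          rw [List.countP_eq_zero]
          intro y hy
          have := h.1 y hy
          simp only [decide_eq_true_eq]
          omega
        simp [hbx, ht]

theorem pvBisectAux_eq (a : List Int) (x : Int) (h : a.Pairwise (· ≤ ·)) :
    ∀ fuel lo hi, hi ≤ a.length → lo ≤ a.countP (fun y => decide (y ≤ x)) →
      a.countP (fun y => decide (y ≤ x)) ≤ hi → hi - lo ≤ fuel →
      pvBisectAux a x fuel lo hi = a.countP (fun y => decide (y ≤ x)) := by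
  intro fuel
  induction fuel with
  | zero => intro lo hi _ h1 h2 h3; simp [pvBisectAux]; omega
  | succ fuel ih =>
    intro lo hi hhi h1 h2 h3
    rw [pvBisectAux]
    by_cases hlh : lo < hi
    · simp only [hlh, if_true]
      have hmidlo : lo ≤ (lo + hi) / 2 := by omega
      have hmidhi : (lo + hi) / 2 < hi := by omega
      have hmidlen : (lo + hi) / 2 < a.length := by omega
      rw [List.getD_eq_getElem a 0 hmidlen]
      by_cases hmx : a[(lo + hi) / 2] ≤ x
      · have := (pv_sorted_le_iff a x h _ hmidlen).mp hmx
        simp only [hmx, if_true]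
        exact ih _ _ hhi (by omega) h2 (by omega)
      · have : ¬ ((lo + hi) / 2 < a.countP (fun y => decide (y ≤ x))) := by
          intro hc; exact hmx ((pv_sorted_le_iff a x h _ hmidlen).mpr hc)
        simp only [hmx, if_false]
        exact ih _ _ (by omega) h1 (by omega) (by omega)
    · simp only [hlh, if_false]; omega

theorem pvBisect_eq (a : List Int) (x : Int) (h : a.Pairwise (· ≤ ·)) :
    pvBisect a x = a.countP (fun y => decide (y ≤ x)) :=
  pvBisectAux_eq a x h a.length 0 a.length le_rfl (Nat.zero_le _) List.countP_le_length (by omega)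

theorem pv_insert_sorted (s : List Int) (x : Int) (h : s.Pairwise (· ≤ ·)) :
    (PySem.List.insert s ((pvBisect s x : Nat) : Int) x).Pairwise (· ≤ ·) ∧
    (PySem.List.insert s ((pvBisect s x : Nat) : Int) x).Perm (x :: s) := by
  have hp : pvBisect s x = s.countP (fun y => decide (y ≤ x)) := pvBisect_eq s x h
  have hple : pvBisect s x ≤ s.length := by rw [hp]; exact List.countP_le_length
  rw [PySem.List.insert_natCast s _ x hple]
  have htake : ∀ b ∈ s.take (pvBisect s x), b ≤ x := by
    intro b hb
    obtain ⟨i, hi, rfl⟩ := List.mem_iff_getElem.mp hb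
    have hlen : i < s.length := by
      have := hi; simp only [List.length_take] at this; omega
    rw [List.getElem_take]
    apply (pv_sorted_le_iff s x h i hlen).mpr
    have := hi; simp only [List.length_take] at this
    omega
  have hdrop : ∀ b ∈ s.drop (pvBisect s x), x ≤ b := by
    intro b hb
    obtain ⟨i, hi, rfl⟩ := List.mem_iff_getElem.mp hb
    have hlen : pvBisect s x + i < s.length := by
      have := hi; simp only [List.length_drop] at this; omega
    rw [List.getElem_drop]
    have : ¬ (s[pvBisect s x + i] ≤ x) := by
      intro hle
      have := (pv_sorted_le_iff s x h _ hlen).mp hle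
      omega
    omega
  constructor
  · rw [List.pairwise_append]
    refine ⟨h.sublist (List.take_sublist _ _), ?_, ?_⟩
    · rw [List.pairwise_cons]
      exact ⟨hdrop, h.sublist (List.drop_sublist _ _)⟩
    · intro a ha b hb
      rcases List.mem_cons.mp hb with rfl | hb
      · exact htake a ha
      · exact le_trans (htake a ha) (hdrop b hb)
  · have h1 : (s.take (pvBisect s x) ++ x :: s.drop (pvBisect s x)).Perm
        (x :: (s.take (pvBisect s x) ++ s.drop (pvBisect s x))) := List.perm_middle
    rwa [List.take_append_drop] at h1

theorem pv_count_split (l : List Int) (v : Int) :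
    l.countP (fun y => decide (y ≤ v)) + l.countP (fun y => decide (v < y)) = l.length := by
  have h := pv_countP_not (fun y => decide (y ≤ v)) l
  have : l.countP (fun a => !decide (a ≤ v)) = l.countP (fun y => decide (v < y)) := by
    apply List.countP_congr
    intro a _
    by_cases hav : a ≤ v
    · simp [hav]
    · simp [hav]; omega
  omega

-- the groups fold, characterised: getD at L collects the indices whose clamped prefix length is L
theorem pv_fold_modify_getD (key : Int × (Int × Int) → Int) :
    ∀ (l : List (Int × (Int × Int))) (g : PySem.Dict Int (List Int)) (L : Int),
      PySem.Dict.getD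
        (l.foldl (fun g p => PySem.Dict.modify g (key p) [] (fun t => t ++ [p.1])) g) L []
      = PySem.Dict.getD g L [] ++ (l.filter (fun p => decide (key p = L))).map (·.1) := by
  intro l
  induction l with
  | nil => intro g L; simp
  | cons p t ih =>
    intro g L
    rw [List.foldl_cons, ih]
    by_cases hk : key p = L
    · rw [List.filter_cons_of_pos (by simp [hk])]
      subst hk
      rw [PySem.Dict.getD_modify, if_pos rfl]
      simp
    · rw [List.filter_cons_of_neg (by simp [hk])]
      rw [PySem.Dict.getD_modify, if_neg (fun h => hk h.symm)]

theorem pvGroups_getD (items : List (Int × Int)) (L : Int) :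
    PySem.Dict.getD (pvGroups items) L []
      = ((PySem.List.enumerate items 0).filter
          (fun p => decide (min (p.2.1 - 1) (items.length : Int) = L))).map (·.1) := by
  unfold pvGroups
  rw [pv_fold_modify_getD (fun p => min (p.2.1 - 1) (items.length : Int))]
  simp

theorem pv_mem_groups (items : List (Int × Int)) (L : Int) (k : Nat) :
    ((k : Int) ∈ PySem.Dict.getD (pvGroups items) L []) ↔
      (k < items.length ∧ pvPrefsI items k = L) := by
  rw [pvGroups_getD]
  constructor
  · intro hm
    obtain ⟨p, hp, hp1⟩ := List.mem_map.mp hm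
    obtain ⟨hpe, hpf⟩ := List.mem_filter.mp hp
    obtain ⟨kk, hkk, rfl⟩ := (PySem.List.mem_enumerate_iff _ _ _).mp hpe
    simp only [zero_add] at hp1 hpf
    have hkeq : k = kk := by exact_mod_cast hp1.symm
    subst hkeq
    refine ⟨hkk, ?_⟩
    simp only [decide_eq_true_eq] at hpf
    rw [pvPrefsI, List.getD_eq_getElem items (0, 0) hkk]
    exact hpf
  · rintro ⟨hk, hL⟩
    apply List.mem_map.mpr
    refine ⟨((k : Int), items[k]), ?_, rfl⟩
    apply List.mem_filter.mpr
    constructor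
    · exact (PySem.List.mem_enumerate_iff _ _ _).mpr ⟨k, hk, by simp⟩
    · simp only [decide_eq_true_eq]
      rw [pvPrefsI, List.getD_eq_getElem items (0, 0) hk] at hL
      exact hL

-- the inner res-insertion fold, characterised
theorem pv_getD_foldl_insert (f : Int → Int) :
    ∀ (bucket : List Int) (r : PySem.Dict Int Int) (x : Int),
      PySem.Dict.getD (bucket.foldl (fun r i => PySem.Dict.insert r i (f i)) r) x 0
        = if x ∈ bucket then f x else PySem.Dict.getD r x 0 := by
  intro bucket
  induction bucket with
  | nil => intro r x; simp
  | cons i t ih =>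
    intro r x
    rw [List.foldl_cons, ih]
    by_cases hxt : x ∈ t
    · simp [hxt]
    · rw [if_neg hxt, PySem.Dict.getD_insert]
      by_cases hxi : x = i
      · simp [hxi]
      · simp [hxi, hxt]

theorem pvPrefsI_le (items : List (Int × Int)) (k : Nat) :
    pvPrefsI items k ≤ (items.length : Int) := by
  rw [pvPrefsI]; omega

-- the sweep: after the remaining rounds m, m+1, …, n, every query with an answered prefix length holds its answer
theorem pvSweep (items : List (Int × Int)) :
    ∀ (cnt m : Nat) (res : PySem.Dict Int Int) (seen : List Int),
      m + cnt = items.length + 1 →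
      seen.Pairwise (· ≤ ·) → seen.Perm ((items.map Prod.snd).take m) →
      (∀ k, k < items.length → 0 ≤ pvPrefsI items k → pvPrefsI items k < (m : Int) →
        PySem.Dict.getD res (k : Int) 0 = pvAns items k) →
      ∀ k, k < items.length → 0 ≤ pvPrefsI items k →
        PySem.Dict.getD
          ((PySem.List.pyRange (m : Int) ((items.length : Int) + 1) 1).foldl
            (pvStep (items.map Prod.snd) (pvGroups items)) (res, seen)).1 (k : Int) 0
          = pvAns items k := by
  intro cnt
  induction cnt with
  | zero =>
    intro m res seen hm hs1 hs2 hres k hk hk0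
    rw [PySem.List.pyRange_one_eq_nil (by omega)]
    exact hres k hk hk0 (by have := pvPrefsI_le items k; omega)
  | succ cnt ih =>
    intro m res seen hm hs1 hs2 hres k hk hk0
    have hmn : m ≤ items.length := by omega
    rw [PySem.List.pyRange_one_cons (by omega), List.foldl_cons]
    have hvlen : (items.map Prod.snd).length = items.length := List.length_map _
    have hslen : seen.length = m := by
      rw [hs2.length_eq, List.length_take]; omega
    -- the value written for a query answered this round is its intended answer
    have hval : ∀ kk, kk < items.length → pvPrefsI items kk = (m : Int) →
        (m : Int) - (pvBisect seen (PySem.List.pyGetD (items.map Prod.snd) (kk : Int) 0) : Nat)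
          = pvAns items kk := by
      intro kk hkk hL
      have hkkv : kk < (items.map Prod.snd).length := by omega
      have hv : PySem.List.pyGetD (items.map Prod.snd) (kk : Int) 0
          = (items.getD kk (0, 0)).2 := by
        rw [PySem.List.pyGetD_natCast, List.getD_eq_getElem _ 0 hkkv,
          List.getD_eq_getElem items (0, 0) hkk]
        simp
      have hb := pvBisect_eq seen (PySem.List.pyGetD (items.map Prod.snd) (kk : Int) 0) hs1
      have hc : seen.countP (fun y => decide (y ≤ PySem.List.pyGetD (items.map Prod.snd) (kk : Int) 0))
          = ((items.map Prod.snd).take m).countP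
            (fun y => decide (y ≤ PySem.List.pyGetD (items.map Prod.snd) (kk : Int) 0)) :=
        hs2.countP_congr (fun x _ => rfl)
      have hsplit := pv_count_split ((items.map Prod.snd).take m)
        (PySem.List.pyGetD (items.map Prod.snd) (kk : Int) 0)
      have htl : ((items.map Prod.snd).take m).length = m := by
        rw [List.length_take]; omega
      have hans : pvAns items kk
          = (((items.map Prod.snd).take m).countP
            (fun w => decide (PySem.List.pyGetD (items.map Prod.snd) (kk : Int) 0 < w)) : Int) := by
        rw [pvAns, hL, hv]
        norm_num
      rw [hans, hb, hc]
      omega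
    -- new seen after this round
    have hseen' :
        (pvStep (items.map Prod.snd) (pvGroups items) (res, seen) (m : Int)).2.Pairwise (· ≤ ·) ∧
        (pvStep (items.map Prod.snd) (pvGroups items) (res, seen) (m : Int)).2.Perm
          ((items.map Prod.snd).take (m + 1)) := by
      rw [pvStep]
      by_cases hem : (m : Int) < ((items.map Prod.snd).length : Int)
      · simp only [hem, if_true]
        have hmlt : m < (items.map Prod.snd).length := by exact_mod_cast hem
        obtain ⟨hp1, hp2⟩ := pv_insert_sorted seen
          (PySem.List.pyGetD (items.map Prod.snd) (m : Int) 0) hs1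
        refine ⟨hp1, ?_⟩
        have hx : PySem.List.pyGetD (items.map Prod.snd) (m : Int) 0
            = (items.map Prod.snd)[m] := by
          rw [PySem.List.pyGetD_natCast, List.getD_eq_getElem _ 0 hmlt]
        have htk : ((items.map Prod.snd).take (m + 1))
            = (items.map Prod.snd).take m ++ [(items.map Prod.snd)[m]] :=
          List.take_succ_eq_append_getElem hmlt
        rw [htk]
        refine hp2.trans ?_
        rw [hx]
        refine (hs2.cons _).trans ?_
        have hm2 := (@List.perm_middle _ (items.map Prod.snd)[m]
          ((items.map Prod.snd).take m) []).symm
        simpa using hm2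
      · simp only [hem, if_false]
        refine ⟨hs1, ?_⟩
        have hge : (items.map Prod.snd).length ≤ m := by omega
        rw [List.take_of_length_le hge, List.take_of_length_le (by omega)] at *
        exact hs2
    -- new res after this round
    have hres' : ∀ k', k' < items.length → 0 ≤ pvPrefsI items k' →
        pvPrefsI items k' < ((m : Int) + 1) →
        PySem.Dict.getD
          (pvStep (items.map Prod.snd) (pvGroups items) (res, seen) (m : Int)).1 (k' : Int) 0
          = pvAns items k' := by
      intro k' hk' hk'0 hk'lt
      rw [pvStep]
      simp only
      rw [pv_getD_foldl_insert]
      by_cases hin : (k' : Int) ∈ PySem.Dict.getD (pvGroups items) (m : Int) []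
      · rw [if_pos hin]
        have := (pv_mem_groups items (m : Int) k').mp hin
        exact hval k' hk' this.2
      · rw [if_neg hin]
        apply hres k' hk' hk'0
        have : pvPrefsI items k' ≠ (m : Int) := by
          intro he
          exact hin ((pv_mem_groups items (m : Int) k').mpr ⟨hk', he⟩)
        omega
    have hstep : (pvStep (items.map Prod.snd) (pvGroups items) (res, seen) (m : Int))
        = ((pvStep (items.map Prod.snd) (pvGroups items) (res, seen) (m : Int)).1,
           (pvStep (items.map Prod.snd) (pvGroups items) (res, seen) (m : Int)).2) := rfl
    rw [hstep]
    have hmc : ((m : Int) + 1) = ((m + 1 : Nat) : Int) := by push_cast; ring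
    rw [hmc]
    exact ih (m + 1) _ _ (by omega) hseen'.1 hseen'.2
      (fun k' h1 h2 h3 => hres' k' h1 h2 (by exact_mod_cast h3)) k hk hk0

theorem pv_nodup_ofList (d : List (Int × Int)) :
    ((PySem.Dict.ofList d).items.map Prod.fst).Nodup := by
  simpa [PySem.Dict.keys] using PySem.Dict.nodup_keys_ofList (ps := d)

theorem pvA_eq (d : List (Int × Int))
    (hkeys : ∀ p ∈ (PySem.Dict.ofList d).items, 1 ≤ p.1) :
    create_new_dictionary d
      = (PySem.Dict.ofList d).items.map (fun kv => (kv.1, pvCntA (PySem.Dict.ofList d).items kv)) := by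
  unfold create_new_dictionary
  have hcongr : ∀ (acc : PySem.Dict Int Int) (kv : Int × Int), kv ∈ (PySem.Dict.ofList d).items →
      PySem.Dict.insert acc kv.1
          ((PySem.List.slice (PySem.Dict.ofList d).values none (some (kv.1 - 1))).foldl
            (fun c v => if kv.2 < v then c + 1 else c) (0 : Int))
        = PySem.Dict.insert acc kv.1 (pvCntA (PySem.Dict.ofList d).items kv) := by
    intro acc kv hm
    have h1 : (0 : Int) ≤ kv.1 - 1 := by have := hkeys kv hm; omega
    have hv : (PySem.Dict.ofList d).values = (PySem.Dict.ofList d).items.map Prod.snd := rfl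
    rw [hv]
    simp only [PySem.List.slice_to _ h1, PySem.List.foldl_ite_add_one, pvCntA, zero_add]
  rw [PySem.List.foldl_congr_mem (PySem.Dict.ofList d).items _ _ PySem.Dict.empty hcongr]
  have := PySem.Dict.items_foldl_insert_fresh (l := (PySem.Dict.ofList d).items)
    (k := Prod.fst) (v := pvCntA (PySem.Dict.ofList d).items)
    (d := PySem.Dict.empty) (by intro a _; rfl) (pv_nodup_ofList d)
  simpa using this

theorem pvB_eq (d : List (Int × Int))
    (hpos : ∀ j, j < (PySem.Dict.ofList d).items.length →
      0 ≤ pvPrefsI (PySem.Dict.ofList d).items j) :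
    create_new_dictionary_alt d
      = (List.range (PySem.Dict.ofList d).items.length).map
          (fun i => (((PySem.Dict.ofList d).items.getD i (0, 0)).1, pvAns (PySem.Dict.ofList d).items i)) := by
  set I := (PySem.Dict.ofList d).items with hI
  have hrk : (List.range I.length).map (fun i => (I.getD i (0, 0)).1) = I.map Prod.fst := by
    apply List.ext_getElem
    · simp
    · intro i h1 h2
      simp only [List.getElem_map, List.getElem_range]
      rw [List.getD_eq_getElem I (0, 0) (by simpa using h1)]
  unfold create_new_dictionary_alt
  rw [← hI]
  set st := (PySem.List.pyRange 0 ((I.length : Int) + 1) 1).foldl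
    (pvStep (I.map Prod.snd) (pvGroups I))
    ((PySem.Dict.empty : PySem.Dict Int Int), ([] : List Int)) with hst
  have hval : ∀ j, j < I.length → PySem.Dict.getD st.1 (j : Int) 0 = pvAns I j := by
    intro j hj
    have h0 : ((0 : Nat) : Int) = (0 : Int) := rfl
    rw [hst, ← h0]
    apply pvSweep I (I.length + 1) 0 _ _ (by omega) List.Pairwise.nil (by simp)
    · intro k _ h2 h3
      omega
    · exact hj
    · exact hpos j hj
  have hfold := PySem.Dict.items_foldl_insert_fresh (l := List.range I.length)
    (k := fun i => (I.getD i (0, 0)).1) (v := fun i => PySem.Dict.getD st.1 (i : Int) 0)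
    (d := PySem.Dict.empty) (by intro a _; rfl) (by rw [hrk]; exact pv_nodup_ofList d)
  rw [hfold]
  apply List.map_congr_left
  intro a ha
  show ((I.getD a (0, 0)).1, PySem.Dict.getD st.1 (a : Int) 0) = _
  rw [hval a (by simpa using ha)]

theorem pv_keys_ge (d : List (Int × Int)) (hpre : ∀ p ∈ d, 1 ≤ p.1) :
    ∀ p ∈ (PySem.Dict.ofList d).items, 1 ≤ p.1 := by
  intro p hp
  have h1 : p.1 ∈ (PySem.Dict.ofList d).keys := PySem.Dict.mem_keys_of_mem_items _ hp
  have h2 : (PySem.Dict.ofList d).keys = PySem.Set.ofList (d.map Prod.fst) := by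
    have := PySem.Dict.keys_foldl_insert_key (l := d) (key := Prod.fst)
      (f := fun dd p => p.2) (d := PySem.Dict.empty)
    simpa [PySem.Dict.keys_empty] using this
  rw [h2] at h1
  have h3 : p.1 ∈ d.map Prod.fst := (PySem.Set.mem_ofList _ _).mp h1
  obtain ⟨q, hq, hq1⟩ := List.mem_map.mp h3
  have := hpre q hq
  omega

-- ===== VERDICT (by name: the statement is the Claim_ definition above) =====
theorem create_new_dictionary_spec : Claim_equal_create_new_dictionary := by
  unfold Claim_equal_create_new_dictionary Spec_create_new_dictionary
  intro d _ hpre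
  have hkeys := pv_keys_ge d hpre
  have hpos : ∀ j, j < (PySem.Dict.ofList d).items.length →
      0 ≤ pvPrefsI (PySem.Dict.ofList d).items j := by
    intro j hj
    have := hkeys _ (List.getElem_mem hj)
    rw [pvPrefsI, List.getD_eq_getElem _ (0, 0) hj]
    omega
  rw [pvA_eq d hkeys, pvB_eq d hpos]
  set I := (PySem.Dict.ofList d).items with hI
  apply List.ext_getElem
  · simp
  · intro i h1 h2
    simp only [List.getElem_map, List.getElem_range]
    rw [List.getD_eq_getElem I (0, 0) (by simpa using h1)]
    have hi : i < I.length := by simpa using h1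
    have hk : 1 ≤ I[i].1 := hkeys I[i] (List.getElem_mem hi)
    refine Prod.ext rfl ?_
    simp only [pvCntA, pvAns, pvPrefsI]
    rw [List.getD_eq_getElem I (0, 0) hi]
    have hvl : (I.map Prod.snd).length = I.length := List.length_map _
    have hmn : (min (I[i].1 - 1) (I.length : Int)).toNat
        = min (I[i].1 - 1).toNat (I.map Prod.snd).length := by
      rw [hvl]; omega
    rw [hmn, ← List.take_eq_take_min]
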